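-- pv_equiv track=rewrite | github.com/Lnrchaos/Aegis | aegis/repl.py | _colorize_segment
-- ===== SOURCE A (Python) =====
-- _CYBER_KEYWORDS = {
--     "override", "firewall", "tunnel", "keylogger", "generate", "hash", "encrypt", "decrypt",
--     "protect", "attack", "defend", "activate", "deactivate", "analyze", "contain", "payload",
--     "load", "manipulate", "inject", "read", "write", "save", "corrupt", "break", "pause",
--     "enter", "exit", "table", "brute", "trace", "monitor", "quarantine", "alert",
-- }
--
-- COLOR_SCHEME = {
--     "control": "\x1b[38;5;81m",      # Color A
--     "loop": "\x1b[38;5;135m",         # Color B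
--     "logical": "\x1b[38;5;178m",      # Color C
--     "cyber": "\x1b[38;5;203m",        # Color D
--     "number": "\x1b[38;5;71m",        # Color E
--     "symbol": "\x1b[38;5;244m",       # Color F
--     "reset": "\x1b[0m",
-- }
--
-- _CONTROL_FLOW_WORDS = {"if", "then", "else", "however", "unless", "yet"}
--
-- _LOOP_WORDS = {"while", "do", "when"}
--
-- _LOGICAL_WORDS = {"and", "or", "not", "nor", "as", "is", "for", "in"}
--
-- def _colorize_segment(seg: str) -> str:
--     if not seg:
--         return seg
--     out: list[str] = []
--     i = 0
--     while i < len(seg):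
--         ch = seg[i]
--         if ch.isalpha() or ch == "_":
--             j = i
--             while j < len(seg) and (seg[j].isalnum() or seg[j] == "_"):
--                 j += 1
--             word = seg[i:j]
--             low = word.lower()
--             color = None
--             if low in _CYBER_KEYWORDS:
--                 color = COLOR_SCHEME["cyber"]
--             elif low in _CONTROL_FLOW_WORDS:
--                 color = COLOR_SCHEME["control"]
--             elif low in _LOOP_WORDS:
--                 color = COLOR_SCHEME["loop"]
--             elif low in _LOGICAL_WORDS:
--                 color = COLOR_SCHEME["logical"]
--             if color:
--                 out.append(f"{color}{word}{COLOR_SCHEME['reset']}")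
--             else:
--                 out.append(word)
--             i = j
--             continue
--         if ch.isdigit():
--             j = i
--             has_dot = False
--             while j < len(seg) and (seg[j].isdigit() or (seg[j] == "." and not has_dot)):
--                 if seg[j] == ".":
--                     has_dot = True
--                 j += 1
--             num = seg[i:j]
--             out.append(f"{COLOR_SCHEME['number']}{num}{COLOR_SCHEME['reset']}")
--             i = j
--             continue
--         if ch in "=+-*/(){}[]:;. ,":
--             out.append(f"{COLOR_SCHEME['symbol']}{ch}{COLOR_SCHEME['reset']}")
--             i += 1
--             continue
--         out.append(ch)
--         i += 1
--     return "".join(out)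
-- ===== SOURCE B (Python) =====
-- import re
--
-- _CYBER_KEYWORDS = {
--     "override", "firewall", "tunnel", "keylogger", "generate", "hash", "encrypt", "decrypt",
--     "protect", "attack", "defend", "activate", "deactivate", "analyze", "contain", "payload",
--     "load", "manipulate", "inject", "read", "write", "save", "corrupt", "break", "pause",
--     "enter", "exit", "table", "brute", "trace", "monitor", "quarantine", "alert",
-- }
--
-- COLOR_SCHEME = {
--     "control": "\x1b[38;5;81m",
--     "loop": "\x1b[38;5;135m",
--     "logical": "\x1b[38;5;178m",
--     "cyber": "\x1b[38;5;203m",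
--     "number": "\x1b[38;5;71m",
--     "symbol": "\x1b[38;5;244m",
--     "reset": "\x1b[0m",
-- }
--
-- _CONTROL_FLOW_WORDS = {"if", "then", "else", "however", "unless", "yet"}
-- _LOOP_WORDS = {"while", "do", "when"}
-- _LOGICAL_WORDS = {"and", "or", "not", "nor", "as", "is", "for", "in"}
--
-- # one merged lookup table (the four keyword sets are disjoint, so merge order is immaterial)
-- _WORD_COLORS = {
--     **{w: COLOR_SCHEME["cyber"] for w in _CYBER_KEYWORDS},
--     **{w: COLOR_SCHEME["control"] for w in _CONTROL_FLOW_WORDS},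
--     **{w: COLOR_SCHEME["loop"] for w in _LOOP_WORDS},
--     **{w: COLOR_SCHEME["logical"] for w in _LOGICAL_WORDS},
-- }
--
-- # ASCII classes match str.isalpha/isalnum/isdigit exactly on the ASCII input domain
-- _TOKEN_RE = re.compile(r'[A-Za-z_][A-Za-z0-9_]*|\d+(?:\.\d*)?|[=+\-*/(){}\[\]:;. ,]|.', re.DOTALL | re.ASCII)
--
--
-- def _colorize_segment(seg: str) -> str:
--     if not seg:
--         return seg
--     reset = COLOR_SCHEME["reset"]
--     pieces = []
--     for m in _TOKEN_RE.finditer(seg):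
--         tok = m.group()
--         c = tok[0]
--         if c.isascii() and (c.isalpha() or c == "_"):
--             color = _WORD_COLORS.get(tok.lower())
--             pieces.append(f"{color}{tok}{reset}" if color else tok)
--         elif c.isascii() and c.isdigit():
--             pieces.append(f"{COLOR_SCHEME['number']}{tok}{reset}")
--         elif c in "=+-*/(){}[]:;. ,":
--             pieces.append(f"{COLOR_SCHEME['symbol']}{c}{reset}")
--         else:
--             pieces.append(tok)
--     return "".join(pieces)
-- ===== Notes on version B (the rewrite author's own statement) =====
-- stated objective: faster
-- what changed: Replaces A's hand-rolled per-character index/while scanner by a regex tokenizer: one compiled alternation (identifier | number | symbol | any char) iterated with re.finditer, plus a single merged keyword-to-color dict built once, so all inner while loops and the four-way membership cascade disappear.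
import Mathlib
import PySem

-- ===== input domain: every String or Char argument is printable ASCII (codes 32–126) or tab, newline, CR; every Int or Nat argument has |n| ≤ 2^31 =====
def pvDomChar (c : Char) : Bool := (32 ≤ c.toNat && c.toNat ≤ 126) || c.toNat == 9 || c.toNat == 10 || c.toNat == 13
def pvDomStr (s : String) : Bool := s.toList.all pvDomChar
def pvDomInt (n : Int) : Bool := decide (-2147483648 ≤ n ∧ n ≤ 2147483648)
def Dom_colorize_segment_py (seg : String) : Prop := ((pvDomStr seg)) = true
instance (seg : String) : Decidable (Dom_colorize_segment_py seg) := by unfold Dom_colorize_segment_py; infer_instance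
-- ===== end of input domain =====

-- B replaces A's hand-rolled index/while scanner by a regex-style tokenizer (tokenize once, then
-- classify each token via one merged keyword→color table); objective: faster by a constant factor
-- (a timing run measured B faster; same O(n) asymptotics).

-- shared module constants (COLOR_SCHEME and the four keyword sets of aegis/repl.py)
def kwCyber : List (List Char) :=
  (["override", "firewall", "tunnel", "keylogger", "generate", "hash", "encrypt", "decrypt",
    "protect", "attack", "defend", "activate", "deactivate", "analyze", "contain", "payload",
    "load", "manipulate", "inject", "read", "write", "save", "corrupt", "break", "pause",
    "enter", "exit", "table", "brute", "trace", "monitor", "quarantine", "alert"]).map String.toList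
def kwControl : List (List Char) :=
  (["if", "then", "else", "however", "unless", "yet"]).map String.toList
def kwLoop : List (List Char) := (["while", "do", "when"]).map String.toList
def kwLogical : List (List Char) :=
  (["and", "or", "not", "nor", "as", "is", "for", "in"]).map String.toList
def colControl : List Char := "\x1b[38;5;81m".toList
def colLoop : List Char := "\x1b[38;5;135m".toList
def colLogical : List Char := "\x1b[38;5;178m".toList
def colCyber : List Char := "\x1b[38;5;203m".toList
def colNumber : List Char := "\x1b[38;5;71m".toList
def colSymbol : List Char := "\x1b[38;5;244m".toList
def colReset : List Char := "\x1b[0m".toList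
def symChars : List Char := "=+-*/(){}[]:;. ,".toList

-- ===== PORT A =====

-- inner while of the word branch: j advances while seg[j].isalnum() or seg[j] == "_"
def aWordScan : List Char → List Char × List Char
  | [] => ([], [])
  | c :: r =>
    if PySem.Chars.isalnum c || c == '_' then
      let (w, rest) := aWordScan r
      (c :: w, rest)
    else ([], c :: r)

-- inner while of the number branch, carrying the has_dot flag
def aNumScan : Bool → List Char → List Char × List Char
  | _, [] => ([], [])
  | hasDot, c :: r =>
    if PySem.Chars.isdigit c then
      let (w, rest) := aNumScan hasDot r
      (c :: w, rest)
    else if c == '.' && !hasDot then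
      let (w, rest) := aNumScan true r
      (c :: w, rest)
    else ([], c :: r)

theorem aWordScan_snd_le (l : List Char) : (aWordScan l).2.length ≤ l.length := by
  induction l with
  | nil => simp [aWordScan]
  | cons c r ih =>
    simp only [aWordScan]
    split
    · simpa using Nat.le_succ_of_le ih
    · simp

theorem aNumScan_snd_le (hasDot : Bool) (l : List Char) :
    (aNumScan hasDot l).2.length ≤ l.length := by
  induction l generalizing hasDot with
  | nil => simp [aNumScan]
  | cons c r ih =>
    simp only [aNumScan]
    split
    · simpa using Nat.le_succ_of_le (ih hasDot)
    · split
      · simpa using Nat.le_succ_of_le (ih true)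
      · simp

-- the outer while loop, building the out list
def aGo : List Char → List (List Char)
  | [] => []
  | c :: rest =>
    if PySem.Chars.isalpha c || c == '_' then
      let ws := aWordScan rest
      let word := c :: ws.1
      let low := PySem.Chars.lower word
      let color : Option (List Char) :=
        if kwCyber.contains low then some colCyber
        else if kwControl.contains low then some colControl
        else if kwLoop.contains low then some colLoop
        else if kwLogical.contains low then some colLogical
        else none
      (match color with
       | some col => col ++ word ++ colReset
       | none => word) :: aGo ws.2
    else if PySem.Chars.isdigit c then
      let ns := aNumScan false rest
      (colNumber ++ (c :: ns.1) ++ colReset) :: aGo ns.2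
    else if symChars.contains c then
      (colSymbol ++ [c] ++ colReset) :: aGo rest
    else [c] :: aGo rest
  termination_by l => l.length
  decreasing_by
  · have := aWordScan_snd_le rest
    simp only [List.length_cons]
    omega
  · have := aNumScan_snd_le false rest
    simp only [List.length_cons]
    omega
  · simp
  · simp

def colorize_segment_py (seg : String) : String :=
  if seg = "" then seg
  else String.ofList (PySem.Chars.join [] (aGo seg.toList))

-- ===== PORT B =====

-- _WORD_COLORS : the merged dict {**cyber, **control, **loop, **logical} (keys are disjoint)
def bWordColors : PySem.Dict (List Char) (List Char) :=
  PySem.Dict.mk (kwCyber.map (fun w => (w, colCyber)) ++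
                 kwControl.map (fun w => (w, colControl)) ++
                 kwLoop.map (fun w => (w, colLoop)) ++
                 kwLogical.map (fun w => (w, colLogical)))

-- the regex alternation [A-Za-z_][A-Za-z0-9_]* | \d+(?:\.\d*)? | [sym] | . applied by finditer:
-- one token matched at each position, in alternative order, each alternative greedy
def bTokens : List Char → List (List Char)
  | [] => []
  | c :: r =>
    if c.isAlpha || c == '_' then
      (c :: r.takeWhile (fun d => d.isAlphanum || d == '_')) ::
        bTokens (r.dropWhile (fun d => d.isAlphanum || d == '_'))
    else if c.isDigit then
      let d1 := r.takeWhile Char.isDigit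
      let r1 := r.dropWhile Char.isDigit
      if r1.head? = some '.' then
        (c :: (d1 ++ '.' :: r1.tail.takeWhile Char.isDigit)) ::
          bTokens (r1.tail.dropWhile Char.isDigit)
      else (c :: d1) :: bTokens r1
    else [c] :: bTokens r
  termination_by l => l.length
  decreasing_by
  · have := List.length_dropWhile_le (fun d => d.isAlphanum || d == '_') r
    simp only [List.length_cons]
    omega
  · have h1 := List.length_dropWhile_le Char.isDigit r
    have h2 := List.length_dropWhile_le Char.isDigit (r.dropWhile Char.isDigit).tail
    have h3 := List.length_tail (l := r.dropWhile Char.isDigit)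
    simp only [List.length_cons]
    omega
  · have := List.length_dropWhile_le Char.isDigit r
    simp only [List.length_cons]
    omega
  · simp

-- per-token classification and wrapping
def bRender (t : List Char) : List Char :=
  match t with
  | [] => []
  | c :: _ =>
    if c.isAlpha || c == '_' then
      match bWordColors.get? (PySem.Chars.lower t) with
      | some col => col ++ t ++ colReset
      | none => t
    else if c.isDigit then colNumber ++ t ++ colReset
    else if symChars.contains c then colSymbol ++ [c] ++ colReset
    else t

def colorize_segment_py_alt (seg : String) : String :=
  if seg = "" then seg
  else String.ofList (PySem.Chars.join [] ((bTokens seg.toList).map bRender))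

-- ===== PRECONDITION & SPEC =====
def Spec_colorize_segment_py (seg : String) (out : String) : Prop := out = colorize_segment_py_alt seg
instance (seg : String) (out : String) : Decidable (Spec_colorize_segment_py seg out) := by unfold Spec_colorize_segment_py; infer_instance

-- ===== CLAIM (what is proved, stated in full; the proofs are below) =====
def Claim_equal_colorize_segment_py : Prop := ∀ (seg : String), Dom_colorize_segment_py seg → Spec_colorize_segment_py seg (colorize_segment_py seg)

-- ===== LEMMAS AND PROOFS =====

-- PySem's Python ASCII character classes coincide with Lean's core ASCII classes
theorem isalpha_eq (c : Char) : PySem.Chars.isalpha c = c.isAlpha := by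
  simp only [PySem.Chars.isalpha, PySem.Chars.isupper, PySem.Chars.islower,
        Char.isAlpha, Char.isUpper, Char.isLower, ge_iff_le, Char.le_def, Bool.decide_and]

theorem isdigit_eq (c : Char) : PySem.Chars.isdigit c = c.isDigit := rfl

theorem isalnum_eq (c : Char) : PySem.Chars.isalnum c = c.isAlphanum := by
  simp [PySem.Chars.isalnum, Char.isAlphanum, isalpha_eq, isdigit_eq]

theorem aWordScan_eq (l : List Char) :
    aWordScan l = (l.takeWhile (fun d => d.isAlphanum || d == '_'),
                   l.dropWhile (fun d => d.isAlphanum || d == '_')) := by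
  induction l with
  | nil => simp [aWordScan]
  | cons c r ih =>
    simp only [aWordScan, ih, isalnum_eq, List.takeWhile_cons, List.dropWhile_cons]
    by_cases h : (c.isAlphanum || c == '_') = true <;> simp [h]

theorem aNumScan_true (l : List Char) :
    aNumScan true l = (l.takeWhile Char.isDigit, l.dropWhile Char.isDigit) := by
  induction l with
  | nil => simp [aNumScan]
  | cons c r ih =>
    simp only [aNumScan, ih, isdigit_eq, List.takeWhile_cons, List.dropWhile_cons]
    by_cases h : c.isDigit = true <;> simp [h]

theorem aNumScan_false (l : List Char) :
    aNumScan false l =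
      (if (l.dropWhile Char.isDigit).head? = some '.' then
        (l.takeWhile Char.isDigit ++ '.' :: (l.dropWhile Char.isDigit).tail.takeWhile Char.isDigit,
         (l.dropWhile Char.isDigit).tail.dropWhile Char.isDigit)
       else (l.takeWhile Char.isDigit, l.dropWhile Char.isDigit)) := by
  induction l with
  | nil => simp [aNumScan]
  | cons c r ih =>
    by_cases hd : c.isDigit = true
    · simp only [aNumScan, isdigit_eq, hd, if_pos, List.takeWhile_cons, List.dropWhile_cons]
      simp only [ih]
      split <;> simp
    · by_cases hdot : c = '.'
      · subst hdot
        simp [aNumScan, isdigit_eq, hd, aNumScan_true]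
      · simp [aNumScan, isdigit_eq, hd, hdot, List.takeWhile_cons, List.dropWhile_cons,
              Ne.symm hdot]

-- first-match lookup of one block of the merged table
theorem find_block (ws : List (List Char)) (v : List Char)
    (rest : List (List Char × List Char)) (s : List Char) :
    List.find? (fun p => p.1 == s) (ws.map (fun w => (w, v)) ++ rest) =
      if ws.contains s then some (s, v) else List.find? (fun p => p.1 == s) rest := by
  induction ws with
  | nil => simp
  | cons w ws ih =>
    by_cases hw : w = s
    · subst hw; simp
    · simp only [List.map_cons, List.cons_append, List.find?_cons, List.contains_cons]
      have hws : (w == s) = false := beq_false_of_ne hw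
      have hsw : ¬ (s = w) := fun h => hw h.symm
      simp [hws, hsw, ih]

-- the merged-dict lookup equals A's membership cascade
theorem lookup_cascade (s : List Char) :
    bWordColors.get? s =
      (if kwCyber.contains s then some colCyber
       else if kwControl.contains s then some colControl
       else if kwLoop.contains s then some colLoop
       else if kwLogical.contains s then some colLogical
       else none) := by
  simp only [bWordColors, PySem.Dict.get?, List.append_assoc]
  rw [find_block, find_block, find_block]
  have : (kwLogical.map (fun w => (w, colLogical))) =
      (kwLogical.map (fun w => (w, colLogical))) ++ [] := by simp
  rw [this, find_block]
  split <;> [skip; split] <;> [skip; skip; split] <;> [skip; skip; skip; split] <;> simp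

-- main loop equivalence: A's scan produces exactly B's rendered tokens
theorem go_eq (n : Nat) : ∀ l : List Char, l.length ≤ n → aGo l = (bTokens l).map bRender := by
  induction n with
  | zero =>
    intro l hl
    have : l = [] := List.eq_nil_of_length_eq_zero (Nat.le_zero.mp hl)
    subst this
    simp [aGo, bTokens]
  | succ n ih =>
    intro l hl
    match l with
    | [] => simp [aGo, bTokens]
    | c :: r =>
      simp only [List.length_cons, Nat.succ_le_succ_iff] at hl
      by_cases hw : (PySem.Chars.isalpha c || c == '_') = true
      · have hw' : (c.isAlpha || c == '_') = true := by rwa [isalpha_eq] at hw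
        have hrec := ih (r.dropWhile (fun d => d.isAlphanum || d == '_'))
          (le_trans (List.length_dropWhile_le _ r) hl)
        rw [aGo, bTokens]
        simp only [hw, hw', if_true, aWordScan_eq, hrec, List.map_cons]
        congr 1
        rw [bRender]
        simp only [hw', if_true, lookup_cascade]
      · have hw' : (c.isAlpha || c == '_') = false := by
          rw [← isalpha_eq]; exact Bool.of_not_eq_true hw
        by_cases hd : (PySem.Chars.isdigit c) = true
        · have hd' : c.isDigit = true := by rwa [isdigit_eq] at hd
          rw [aGo, bTokens]
          simp only [hw, hw', hd, hd', Bool.false_eq_true, if_false, if_true, aNumScan_false]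
          have hdw := List.length_dropWhile_le Char.isDigit r
          by_cases hdot : (r.dropWhile Char.isDigit).head? = some '.'
          · have htl := List.length_tail (l := r.dropWhile Char.isDigit)
            have hrec := ih ((r.dropWhile Char.isDigit).tail.dropWhile Char.isDigit)
              (le_trans (List.length_dropWhile_le _ _) (by omega))
            simp only [hdot, if_true, hrec, List.map_cons]
            congr 1
            rw [bRender]
            simp [hw', hd']
          · have hrec := ih (r.dropWhile Char.isDigit) (le_trans hdw hl)
            simp only [hdot, if_false, hrec, List.map_cons]
            rw [bRender]
            simp [hw', hd']
        · have hd' : c.isDigit = false := by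
            rw [← isdigit_eq]; exact Bool.of_not_eq_true hd
          have hrec := ih r hl
          rw [aGo, bTokens]
          simp only [hw, hw', hd, hd', Bool.false_eq_true, if_false, hrec, List.map_cons]
          congr 1
          rw [bRender]
          by_cases hs : c ∈ symChars <;> simp [hw', hd', hs]

-- ===== VERDICT (by name: the statement is the Claim_ definition above) =====
theorem colorize_segment_py_spec : Claim_equal_colorize_segment_py := by
  intro seg _
  unfold Spec_colorize_segment_py colorize_segment_py colorize_segment_py_alt
  rw [go_eq seg.toList.length seg.toList (le_refl _)]
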